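-- pv_equiv track=rewrite | github.com/Pratinav-Shrivastava/codeforces | Random/B_Even_Array.py | even_array
-- ===== SOURCE A (Python) =====
-- def even_array(nums):
--     a, b = 0, 0
--     for i in range(len(nums)):
--         if i % 2 != nums[i] % 2:
--             if  i % 2 == 0:
--                 a += 1
--             else:
--                 b += 1
--     if a != b:
--         return -1
--     else:
--         return a
-- ===== SOURCE B (Python) =====
-- def even_array(nums):
--     a = sum(1 for x in nums[0::2] if x % 2 != 0)
--     b = sum(1 for x in nums[1::2] if x % 2 == 0)
--     return -1 if a != b else a
-- ===== Notes on version B (the rewrite author's own statement) =====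
-- stated objective: idiomatic
-- what changed: Replaces the single interleaved loop over indices (tracking index parity and two counters) with two shaped passes: slice out the even-index and odd-index subsequences and count odd values in the first and even values in the second.
import Mathlib
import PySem

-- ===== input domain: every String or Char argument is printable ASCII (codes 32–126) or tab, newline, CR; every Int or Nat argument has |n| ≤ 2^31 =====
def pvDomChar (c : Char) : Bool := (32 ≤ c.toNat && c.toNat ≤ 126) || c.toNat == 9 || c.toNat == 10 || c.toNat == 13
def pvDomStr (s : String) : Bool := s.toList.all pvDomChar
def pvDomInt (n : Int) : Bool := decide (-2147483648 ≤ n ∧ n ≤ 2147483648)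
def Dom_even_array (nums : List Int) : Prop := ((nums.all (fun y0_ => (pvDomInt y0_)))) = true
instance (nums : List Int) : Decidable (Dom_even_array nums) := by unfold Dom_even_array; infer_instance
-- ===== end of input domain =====

-- B replaces A's single index-parity loop with two slice passes (even-index and odd-index
-- subsequences) counted separately; objective: idiomatic, same O(n) cost.

-- ===== PORT A =====
def even_array (nums : List Int) : Int :=
  let r := (PySem.List.pyRange 0 (PySem.List.len nums) 1).foldl
    (fun (p : Int × Int) i =>
      if PySem.Int.mod i 2 != PySem.Int.mod (PySem.List.pyGetD nums i 0) 2 then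
        if PySem.Int.mod i 2 == 0 then (p.1 + 1, p.2) else (p.1, p.2 + 1)
      else p) (0, 0)
  if r.1 != r.2 then -1 else r.1

-- ===== PORT B =====
def even_array_alt (nums : List Int) : Int :=
  let a : Int := (((PySem.List.slice? nums (some 0) none 2).getD []).countP
      (fun x => PySem.Int.mod x 2 != 0) : Nat)
  let b : Int := (((PySem.List.slice? nums (some 1) none 2).getD []).countP
      (fun x => PySem.Int.mod x 2 == 0) : Nat)
  if a != b then -1 else a

-- ===== PRECONDITION & SPEC =====
def Spec_even_array (nums : List Int) (out : Int) : Prop := out = even_array_alt nums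
instance (nums : List Int) (out : Int) : Decidable (Spec_even_array nums out) := by unfold Spec_even_array; infer_instance

-- ===== CLAIM (what is proved, stated in full; the proofs are below) =====
def Claim_equal_even_array : Prop := ∀ (nums : List Int), Dom_even_array nums → Spec_even_array nums (even_array nums)

-- ===== LEMMAS AND PROOFS =====

-- elements of a list at even offsets (proof-side view of nums[0::2])
def eoAux : List Int → List Int
  | [] => []
  | [x] => [x]
  | x :: _ :: t => x :: eoAux t

lemma eoAux_cons_tail (y : Int) (t : List Int) : eoAux (y :: t) = y :: eoAux t.tail := by
  cases t <;> simp [eoAux]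

lemma ev_filterMap : ∀ (xs : List Int),
    List.filterMap (fun k => xs[2*k]?) (List.range ((xs.length+1)/2)) = eoAux xs := by
  intro xs
  induction xs using eoAux.induct with
  | case1 => simp [eoAux]
  | case2 x => simp [eoAux]
  | case3 x y t ih =>
      have hlen : ((x :: y :: t).length + 1) / 2 = (t.length + 1) / 2 + 1 := by
        simp [List.length_cons]; omega
      rw [hlen, List.range_succ_eq_map, List.filterMap_cons, List.filterMap_map]
      simp only [Nat.mul_zero, List.getElem?_cons_zero]
      have he : (fun k : Nat => (x :: y :: t)[2 * (k+1)]?) = (fun k : Nat => t[2*k]?) := by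
        funext k
        have h2 : 2 * (k + 1) = (2*k) + 1 + 1 := by ring
        simp [h2]
      simp only [Function.comp_def, Nat.succ_eq_add_one]
      rw [show (fun a => (x :: y :: t)[2 * (a+1)]?) = (fun k : Nat => t[2*k]?) from he, ih]
      simp [eoAux]

-- nums[0::2] is the even-offset sublist
lemma slice0 (xs : List Int) :
    (PySem.List.slice? xs (some 0) none 2).getD [] = eoAux xs := by
  simp only [PySem.List.slice?, PySem.List.sliceIndices]
  norm_num
  have hc : (if 0 < xs.length then (((xs.length : Int) + 2 - 1) / 2).toNat else 0)
      = (xs.length + 1) / 2 := by split <;> omega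
  rw [hc]
  have he : (fun k : Nat => xs[(2 * (k : Int)).toNat]?) = (fun k : Nat => xs[2*k]?) := by
    funext k; congr 1
  rw [he, ev_filterMap]

-- nums[1::2] is the even-offset sublist of the tail
lemma slice1 (xs : List Int) :
    (PySem.List.slice? xs (some 1) none 2).getD [] = eoAux xs.tail := by
  cases xs with
  | nil => rfl
  | cons x t =>
      simp only [PySem.List.slice?, PySem.List.sliceIndices]
      norm_num
      have hc : (if 0 < t.length then (((t.length : Int) + 2 - 1) / 2).toNat else 0)
          = (t.length + 1) / 2 := by split <;> omega
      rw [hc]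
      have he : (fun k : Nat => (x :: t)[(1 + 2 * (k : Int)).toNat]?) = (fun k : Nat => t[2*k]?) := by
        funext k
        have h2 : (1 + 2 * (k : Int)).toNat = 2*k + 1 := by omega
        simp [h2]
      rw [he, ev_filterMap]

-- A's loop body on an (index, value) pair
def stepAB (p : Int × Int) (q : Int × Int) : Int × Int :=
  if PySem.Int.mod q.1 2 != PySem.Int.mod q.2 2 then
    if PySem.Int.mod q.1 2 == 0 then (p.1 + 1, p.2) else (p.1, p.2 + 1)
  else p

-- A's loop, run from an even start index, counts odd values at even offsets and even values at odd offsets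
lemma mainA : ∀ (xs : List Int) (s a0 b0 : Int), s % 2 = 0 →
    (PySem.List.enumerate xs s).foldl stepAB (a0, b0)
    = (a0 + ((eoAux xs).countP (fun x => PySem.Int.mod x 2 != 0) : Nat),
       b0 + ((eoAux xs.tail).countP (fun x => PySem.Int.mod x 2 == 0) : Nat)) := by
  intro xs
  have hmod : ∀ a : Int, PySem.Int.mod a 2 = a % 2 :=
    fun a => PySem.Int.mod_eq_emod_of_pos (by norm_num)
  induction xs using eoAux.induct with
  | case1 => intro s a0 b0 hs; simp [PySem.List.enumerate, eoAux]
  | case2 x =>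
      intro s a0 b0 hs
      simp only [PySem.List.enumerate_cons, PySem.List.enumerate_nil, List.foldl_cons,
        List.foldl_nil, eoAux, List.tail_cons, List.countP_nil]
      rcases Int.emod_two_eq_zero_or_one x with hx | hx <;>
        simp [stepAB, hx, hs]
  | case3 x y t ih =>
      intro s a0 b0 hs
      have hs1 : (s + 1) % 2 = 1 := by omega
      have hs2 : (s + 1 + 1) % 2 = 0 := by omega
      simp only [PySem.List.enumerate_cons, List.foldl_cons]
      rcases Int.emod_two_eq_zero_or_one x with hx | hx <;>
        rcases Int.emod_two_eq_zero_or_one y with hy | hy <;>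
        · have e1 : stepAB (a0, b0) (s, x) = (a0 + (if x % 2 = 0 then 0 else 1), b0) := by
            simp [stepAB, hs, hx]
          have e2 : ∀ p : Int × Int, stepAB p (s + 1, y)
              = (p.1, p.2 + (if y % 2 = 0 then 1 else 0)) := by
            intro p; simp [stepAB, hs1, hy]
          rw [e1, e2, ih (s+1+1) _ _ hs2]
          simp only [eoAux, List.tail_cons, eoAux_cons_tail, List.countP_cons, hmod, hx, hy, Prod.mk.injEq]
          norm_num
          all_goals omega

-- ===== VERDICT (by name: the statement is the Claim_ definition above) =====
theorem even_array_spec : Claim_equal_even_array := by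
  unfold Claim_equal_even_array Spec_even_array
  intro nums _
  unfold even_array even_array_alt
  have h1 := mainA nums 0 0 0 (by norm_num)
  rw [PySem.List.enumerate_eq_map_pyRange nums (0 : Int), List.foldl_map] at h1
  rw [show ((PySem.List.pyRange 0 (PySem.List.len nums) 1).foldl
      (fun (p : Int × Int) i =>
        if PySem.Int.mod i 2 != PySem.Int.mod (PySem.List.pyGetD nums i 0) 2 then
          if PySem.Int.mod i 2 == 0 then (p.1 + 1, p.2) else (p.1, p.2 + 1)
        else p) (0, 0))
      = (PySem.List.pyRange 0 (PySem.List.len nums) 1).foldl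
        (fun (p : Int × Int) i => stepAB p (i, PySem.List.pyGetD nums i 0)) (0, 0) from rfl, h1]
  rw [slice0, slice1]
  norm_num
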